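-- pv_equiv track=rewrite | github.com/National-Tutoring-Observatory/codebook-injected-segmentation | src/eval/evaluation_segmention.py | get_boundary_vector
-- ===== SOURCE A (Python) =====
-- def get_boundary_vector(num_utterances, boundary_indices):
--     """
--     Creates a binary vector where 1 indicates a boundary *after* that utterance.
--     Length is num_utterances - 1 (internal boundaries).
--     """
--     if num_utterances <= 1:
--         return []
--     vec = [0] * (num_utterances - 1)
--     for idx in boundary_indices:
--         if 0 <= idx < len(vec):
--             vec[idx] = 1
--     return vec
-- ===== SOURCE B (Python) =====
-- def get_boundary_vector(num_utterances, boundary_indices):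
--     """
--     Creates a binary vector where 1 indicates a boundary *after* that utterance.
--     Length is num_utterances - 1 (internal boundaries).
--     """
--     valid = set(boundary_indices)
--     return [1 if i in valid else 0 for i in range(num_utterances - 1)]
-- ===== Notes on version B (the rewrite author's own statement) =====
-- stated objective: idiomatic
-- what changed: Instead of pre-allocating a zero vector and writing 1s at each listed index, B builds a set of the boundary indices once and emits the vector as a single comprehension over the output positions, testing membership.
import Mathlib
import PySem

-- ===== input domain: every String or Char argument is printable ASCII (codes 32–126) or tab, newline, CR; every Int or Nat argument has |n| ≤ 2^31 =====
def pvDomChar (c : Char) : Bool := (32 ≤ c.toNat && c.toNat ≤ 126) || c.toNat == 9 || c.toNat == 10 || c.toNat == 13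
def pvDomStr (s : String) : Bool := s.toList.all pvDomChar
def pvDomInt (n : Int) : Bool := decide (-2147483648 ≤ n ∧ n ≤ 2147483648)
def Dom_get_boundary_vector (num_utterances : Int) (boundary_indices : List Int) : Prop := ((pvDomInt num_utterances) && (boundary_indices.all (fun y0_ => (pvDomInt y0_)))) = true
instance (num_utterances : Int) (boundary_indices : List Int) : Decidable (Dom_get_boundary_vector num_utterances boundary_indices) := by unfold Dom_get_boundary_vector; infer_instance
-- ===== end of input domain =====

-- ===== PORT A =====
-- B replaces A's write-into-a-zero-vector loop by a membership-test comprehension over the positions (idiomatic; same cost).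
def get_boundary_vector (num_utterances : Int) (boundary_indices : List Int) : List Int :=
  if num_utterances ≤ 1 then []
  else
    let vec := List.replicate (num_utterances - 1).toNat (0 : Int)
    boundary_indices.foldl
      (fun vec idx =>
        if 0 ≤ idx ∧ idx < (PySem.List.len vec : Int) then PySem.List.pySetD vec idx 1 else vec)
      vec

-- ===== PORT B =====
def get_boundary_vector_alt (num_utterances : Int) (boundary_indices : List Int) : List Int :=
  let valid := PySem.Set.ofList boundary_indices
  (PySem.List.pyRange 0 (num_utterances - 1) 1).map (fun i => if valid.contains i then 1 else 0)

-- ===== PRECONDITION & SPEC =====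
def Spec_get_boundary_vector (num_utterances : Int) (boundary_indices : List Int) (out : List Int) : Prop := out = get_boundary_vector_alt num_utterances boundary_indices
instance (num_utterances : Int) (boundary_indices : List Int) (out : List Int) : Decidable (Spec_get_boundary_vector num_utterances boundary_indices out) := by unfold Spec_get_boundary_vector; infer_instance

-- ===== CLAIM (what is proved, stated in full; the proofs are below) =====
def Claim_equal_get_boundary_vector : Prop := ∀ (num_utterances : Int) (boundary_indices : List Int), Dom_get_boundary_vector num_utterances boundary_indices → Spec_get_boundary_vector num_utterances boundary_indices (get_boundary_vector num_utterances boundary_indices)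

-- ===== LEMMAS AND PROOFS =====

-- ===== VERDICT (by name: the statement is the Claim_ definition above) =====
lemma lenA (bi : List Int) (vec : List Int) :
    (bi.foldl (fun vec idx =>
        if 0 ≤ idx ∧ idx < (PySem.List.len vec : Int) then PySem.List.pySetD vec idx 1 else vec) vec).length
      = vec.length := by
  induction bi generalizing vec with
  | nil => rfl
  | cons idx bi ih =>
      simp only [List.foldl_cons]
      split_ifs with h
      · rw [ih]; simp [PySem.List.pySetD_of_nonneg vec 1 h.1]
      · exact ih vec

lemma getA (bi : List Int) (vec : List Int) (j : Nat) (hj : j < vec.length) :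
    (bi.foldl (fun vec idx =>
        if 0 ≤ idx ∧ idx < (PySem.List.len vec : Int) then PySem.List.pySetD vec idx 1 else vec) vec)[j]'(by rw [lenA]; exact hj)
      = if (j : Int) ∈ bi then 1 else vec[j] := by
  induction bi generalizing vec with
  | nil => simp
  | cons idx bi ih =>
      simp only [List.foldl_cons]
      by_cases h : 0 ≤ idx ∧ idx < (PySem.List.len vec : Int)
      · have hset : PySem.List.pySetD vec idx 1 = vec.set idx.toNat 1 :=
          PySem.List.pySetD_of_nonneg vec 1 h.1
        have hlen : (PySem.List.pySetD vec idx 1).length = vec.length := by simp [hset]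
        simp only [if_pos h]
        rw [ih _ (by omega)]
        by_cases hji : (j : Int) = idx
        · have : idx.toNat = j := by omega
          simp [hset, this, hji]
        · have : idx.toNat ≠ j := by omega
          simp [hset, this, hji]
      · simp only [if_neg h]
        rw [ih _ hj]
        have hji : (j : Int) ≠ idx := by
          simp only [PySem.List.len] at h
          omega
        simp [hji]

theorem get_boundary_vector_spec : Claim_equal_get_boundary_vector := by
  intro n bi _
  unfold Spec_get_boundary_vector get_boundary_vector get_boundary_vector_alt
  by_cases hn : n ≤ 1
  · simp [hn, PySem.List.pyRange_one_eq_nil (by omega : n - 1 ≤ 0)]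
  · rw [if_neg hn]
    have hm : (0 : Int) ≤ n - 1 := by omega
    simp only [PySem.List.pyRange_one (0 : Int) (n - 1), Int.sub_zero, List.map_map]
    apply List.ext_getElem
    · rw [lenA]; simp
    · intro j h1 h2
      have hj : j < (n - 1).toNat := by
        rw [lenA] at h1; simpa using h1
      rw [getA _ _ _ (by simpa using hj)]
      simp
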